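-- pv_equiv track=rewrite | github.com/monivireakly/smol-khmer-crf | cleaning.py | match_syllable_pattern
-- ===== SOURCE A (Python) =====
-- SYLLABLE_PATTERNS = {
--     'C': 'CONSONANT',
--     'V': 'VOWEL',
--     'S': 'SUBSCRIPT',
--     'D': 'DIACRITIC'
-- }
--
-- def match_syllable_pattern(char_types):
--     patterns = [
--         ['C', 'V'],           # CV
--         ['C', 'V', 'C'],      # CVC
--         ['C', 'S', 'C', 'V'], # CSCV
--         ['C', 'S', 'C']       # CSC
--     ]
--
--     for pattern in patterns:
--         if len(char_types) != len(pattern):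
--             continue
--         if all(SYLLABLE_PATTERNS[p] == t for p, t in zip(pattern, char_types)):
--             return True
--     return False
-- ===== SOURCE B (Python) =====
-- SYLLABLE_PATTERNS = {
--     'C': 'CONSONANT',
--     'V': 'VOWEL',
--     'S': 'SUBSCRIPT',
--     'D': 'DIACRITIC'
-- }
--
-- # DFA recognising exactly the four valid syllable shapes CV, CVC, CSCV, CSC.
-- # States: 0 start, 1 after C, 2 after CV (accept), 3 after CS,
-- # 4 after CVC (accept), 5 after CSC (accept), 6 after CSCV (accept).
-- _TRANS = {
--     (0, 'CONSONANT'): 1,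
--     (1, 'VOWEL'): 2,
--     (1, 'SUBSCRIPT'): 3,
--     (2, 'CONSONANT'): 4,
--     (3, 'CONSONANT'): 5,
--     (5, 'VOWEL'): 6,
-- }
-- _ACCEPT = {2, 4, 5, 6}
--
-- def match_syllable_pattern(char_types):
--     state = 0
--     for t in char_types:
--         state = _TRANS.get((state, t), -1)
--         if state < 0:
--             return False
--     return state in _ACCEPT
-- ===== Notes on version B (the rewrite author's own statement) =====
-- stated objective: alternative
-- what changed: Replaces A's per-pattern loop with length guard and element-wise all()/zip comparison by a single left-to-right DFA scan: a transition table keyed by (state, char_type) is consumed once, with early exit on a dead state and a final accepting-state test.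
import Mathlib
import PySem

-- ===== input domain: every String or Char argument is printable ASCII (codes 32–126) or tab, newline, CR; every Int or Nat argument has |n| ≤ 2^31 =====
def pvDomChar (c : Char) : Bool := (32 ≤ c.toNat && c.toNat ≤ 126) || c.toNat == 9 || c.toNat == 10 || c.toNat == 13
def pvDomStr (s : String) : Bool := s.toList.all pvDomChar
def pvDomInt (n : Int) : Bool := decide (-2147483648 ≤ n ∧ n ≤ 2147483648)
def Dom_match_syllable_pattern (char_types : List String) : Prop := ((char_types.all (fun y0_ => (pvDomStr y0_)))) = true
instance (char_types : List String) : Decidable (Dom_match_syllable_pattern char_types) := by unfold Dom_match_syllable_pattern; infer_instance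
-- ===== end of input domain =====

-- B replaces A's per-pattern loop (length guard + element-wise all()/zip comparison)
-- by a single left-to-right DFA scan over a transition table (alternative algorithm).

-- ===== PORT A =====
def sylPatterns : PySem.Dict String String :=
  PySem.Dict.ofList [("C", "CONSONANT"), ("V", "VOWEL"), ("S", "SUBSCRIPT"), ("D", "DIACRITIC")]

-- all(SYLLABLE_PATTERNS[p] == t for p, t in zip(pattern, char_types))
-- (every key used is present in the dict, so getD with a dummy default is exact here)
def sylAllMatch (pattern char_types : List String) : Bool :=
  (pattern.zip char_types).all (fun pt => sylPatterns.getD pt.1 "" == pt.2)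

def sylLoop (pats : List (List String)) (char_types : List String) : Bool :=
  match pats with
  | [] => false
  | pattern :: rest =>
    if char_types.length ≠ pattern.length then sylLoop rest char_types
    else if sylAllMatch pattern char_types then true
    else sylLoop rest char_types

def match_syllable_pattern (char_types : List String) : Bool :=
  sylLoop [["C", "V"], ["C", "V", "C"], ["C", "S", "C", "V"], ["C", "S", "C"]] char_types

-- ===== PORT B =====
-- transition table _TRANS, keyed by (state, char_type)
def dfaTrans : PySem.Dict (Int × String) Int :=
  PySem.Dict.ofList
    [((0, "CONSONANT"), 1),
     ((1, "VOWEL"), 2),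
     ((1, "SUBSCRIPT"), 3),
     ((2, "CONSONANT"), 4),
     ((3, "CONSONANT"), 5),
     ((5, "VOWEL"), 6)]

-- accepting states _ACCEPT
def dfaAccept : PySem.Set Int := PySem.Set.ofList [2, 4, 5, 6]

-- the for-loop of B: fold the input through the DFA, early return False on a dead state
def dfaLoop (state : Int) (ts : List String) : Bool :=
  match ts with
  | [] => PySem.Set.contains dfaAccept state
  | t :: rest =>
    let s := dfaTrans.getD (state, t) (-1)
    if s < 0 then false else dfaLoop s rest

def match_syllable_pattern_alt (char_types : List String) : Bool :=
  dfaLoop 0 char_types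

-- ===== PRECONDITION & SPEC =====
def Spec_match_syllable_pattern (char_types : List String) (out : Bool) : Prop := out = match_syllable_pattern_alt char_types
instance (char_types : List String) (out : Bool) : Decidable (Spec_match_syllable_pattern char_types out) := by unfold Spec_match_syllable_pattern; infer_instance

-- ===== CLAIM =====
def Claim_equal_match_syllable_pattern : Prop := ∀ (char_types : List String), Dom_match_syllable_pattern char_types → Spec_match_syllable_pattern char_types (match_syllable_pattern char_types)

-- ===== LEMMAS AND PROOFS =====
theorem dfaTrans_eq_mk : dfaTrans = PySem.Dict.mk
    [((0, "CONSONANT"), 1),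
     ((1, "VOWEL"), 2),
     ((1, "SUBSCRIPT"), 3),
     ((2, "CONSONANT"), 4),
     ((3, "CONSONANT"), 5),
     ((5, "VOWEL"), 6)] := by decide

theorem dfaStep (s : Int) (t : String) :
    dfaTrans.getD (s, t) (-1) =
      if s = 0 ∧ "CONSONANT" = t then 1
      else if s = 1 ∧ "VOWEL" = t then 2
      else if s = 1 ∧ "SUBSCRIPT" = t then 3
      else if s = 2 ∧ "CONSONANT" = t then 4
      else if s = 3 ∧ "CONSONANT" = t then 5
      else if s = 5 ∧ "VOWEL" = t then 6
      else -1 := by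
  rw [dfaTrans_eq_mk]
  simp only [PySem.Dict.getD, PySem.Dict.get?_mk_cons]
  split_ifs <;> simp_all [Prod.ext_iff] <;> try decide
  simp [PySem.Dict.get?]

theorem sylC : sylPatterns.getD "C" "" = "CONSONANT" := by decide
theorem sylV : sylPatterns.getD "V" "" = "VOWEL" := by decide
theorem sylS : sylPatterns.getD "S" "" = "SUBSCRIPT" := by decide

-- residual-language characterisation of dfaLoop, one lemma per reachable state
theorem dfaB6 (ts : List String) : dfaLoop 6 ts = decide (ts = []) := by
  cases ts with
  | nil => decide
  | cons t rest => simp only [dfaLoop, dfaStep]; simp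

theorem dfaB4 (ts : List String) : dfaLoop 4 ts = decide (ts = []) := by
  cases ts with
  | nil => decide
  | cons t rest => simp only [dfaLoop, dfaStep]; simp

theorem dfaB5 (ts : List String) :
    dfaLoop 5 ts = (decide (ts = []) || decide (ts = ["VOWEL"])) := by
  cases ts with
  | nil => decide
  | cons t rest =>
    simp only [dfaLoop, dfaStep]
    by_cases h : t = "VOWEL" <;> simp_all [eq_comm, dfaB6]

theorem dfaB2 (ts : List String) :
    dfaLoop 2 ts = (decide (ts = []) || decide (ts = ["CONSONANT"])) := by
  cases ts with
  | nil => decide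
  | cons t rest =>
    simp only [dfaLoop, dfaStep]
    by_cases h : t = "CONSONANT" <;> simp_all [eq_comm, dfaB4]

theorem dfaB3 (ts : List String) :
    dfaLoop 3 ts = (decide (ts = ["CONSONANT"]) || decide (ts = ["CONSONANT", "VOWEL"])) := by
  cases ts with
  | nil => decide
  | cons t rest =>
    simp only [dfaLoop, dfaStep]
    by_cases h : t = "CONSONANT" <;> simp_all [eq_comm, dfaB5]

theorem dfaB1 (ts : List String) :
    dfaLoop 1 ts = (decide (ts = ["VOWEL"]) || decide (ts = ["VOWEL", "CONSONANT"]) ||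
      decide (ts = ["SUBSCRIPT", "CONSONANT"]) ||
      decide (ts = ["SUBSCRIPT", "CONSONANT", "VOWEL"])) := by
  cases ts with
  | nil => decide
  | cons t rest =>
    simp only [dfaLoop, dfaStep]
    by_cases h : t = "VOWEL" <;> by_cases h' : t = "SUBSCRIPT" <;> simp_all [eq_comm, dfaB2, dfaB3]

theorem dfaB0 (ts : List String) :
    dfaLoop 0 ts = (decide (ts = ["CONSONANT", "VOWEL"]) ||
      decide (ts = ["CONSONANT", "VOWEL", "CONSONANT"]) ||
      decide (ts = ["CONSONANT", "SUBSCRIPT", "CONSONANT"]) ||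
      decide (ts = ["CONSONANT", "SUBSCRIPT", "CONSONANT", "VOWEL"])) := by
  cases ts with
  | nil => decide
  | cons t rest =>
    simp only [dfaLoop, dfaStep]
    by_cases h : t = "CONSONANT" <;> simp_all [eq_comm, dfaB1]

-- ===== VERDICT =====
theorem match_syllable_pattern_spec : Claim_equal_match_syllable_pattern := by
  intro ct _
  unfold Spec_match_syllable_pattern
  rw [match_syllable_pattern_alt, dfaB0]
  match ct with
  | [] => decide
  | [a] => simp [match_syllable_pattern, sylLoop]
  | [a, b] =>
    simp [match_syllable_pattern, sylLoop, sylAllMatch, sylC, sylV, List.zip, List.all]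
    simp [eq_comm]
  | [a, b, c] =>
    simp [match_syllable_pattern, sylLoop, sylAllMatch, sylC, sylV, sylS, List.zip, List.all]
    simp [eq_comm]
  | [a, b, c, d] =>
    simp [match_syllable_pattern, sylLoop, sylAllMatch, sylC, sylV, sylS, List.zip, List.all]
    simp [eq_comm]
  | a :: b :: c :: d :: e :: rest =>
    simp [match_syllable_pattern, sylLoop]
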